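-- pv_equiv track=rewrite | github.com/yasirysr47/CareTakerV2 | disease_predictor.py | get_most_probable_disease
-- ===== SOURCE A (Python) =====
-- def get_most_probable_disease(disease_count_list: list) -> list:
--     """Generate top most common disease out of a list of disease.
--
--     Args:
--         disease_count_list (list): a list of disease, sorted (descending) by its count with maximum 5 elements.
--
--     Returns:
--         list: a list of most_probable_disease upto 5 disease max.
--     """
--     most_probable_disease = []
--     max_count = 0
--     for  disease, count in disease_count_list:
--         if count >= max_count:
--             max_count = count
--             most_probable_disease.append(disease)
--
--     return most_probable_disease
-- ===== SOURCE B (Python) =====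
-- def get_most_probable_disease(disease_count_list: list) -> list:
--     """Two-pass version: precompute a prefix-maximum threshold table, then filter."""
--     thresholds = []
--     m = 0
--     for _, c in disease_count_list:
--         thresholds.append(m)
--         m = max(m, c)
--     return [d for (d, c), t in zip(disease_count_list, thresholds) if c >= t]
-- ===== Notes on version B (the rewrite author's own statement) =====
-- stated objective: alternative
-- what changed: Replaces the single stateful running-max append loop with a precomputed prefix-maximum threshold table followed by a separate zip-and-filter pass.
import Mathlib
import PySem

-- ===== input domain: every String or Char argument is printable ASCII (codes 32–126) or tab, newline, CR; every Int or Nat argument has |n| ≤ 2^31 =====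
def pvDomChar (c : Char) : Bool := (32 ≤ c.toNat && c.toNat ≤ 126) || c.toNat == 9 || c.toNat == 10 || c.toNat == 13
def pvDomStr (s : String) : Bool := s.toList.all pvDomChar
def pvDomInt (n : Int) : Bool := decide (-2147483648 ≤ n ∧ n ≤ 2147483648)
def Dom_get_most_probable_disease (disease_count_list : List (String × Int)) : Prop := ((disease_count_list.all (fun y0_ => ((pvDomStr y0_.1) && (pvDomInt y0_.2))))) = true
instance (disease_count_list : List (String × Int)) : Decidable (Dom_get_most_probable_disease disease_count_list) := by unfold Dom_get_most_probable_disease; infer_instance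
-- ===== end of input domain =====

-- ===== PORT A =====
def get_most_probable_disease (disease_count_list : List (String × Int)) : List String :=
  (disease_count_list.foldl
    (fun (st : List String × Int) dc =>
      if dc.2 ≥ st.2 then (st.1 ++ [dc.1], dc.2) else st)
    ([], 0)).1

-- ===== PORT B =====
-- prefix-maximum threshold table: entry i is max(m, counts[0..i-1])
def pvThresholds (l : List (String × Int)) (m : Int) : List Int :=
  match l with
  | [] => []
  | (_, c) :: rest => m :: pvThresholds rest (max m c)

def get_most_probable_disease_alt (disease_count_list : List (String × Int)) : List String :=
  ((disease_count_list.zip (pvThresholds disease_count_list 0)).filter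
      (fun p => p.1.2 ≥ p.2)).map (fun p => p.1.1)

-- ===== PRECONDITION & SPEC =====
def Spec_get_most_probable_disease (disease_count_list : List (String × Int)) (out : List String) : Prop := out = get_most_probable_disease_alt disease_count_list
instance (disease_count_list : List (String × Int)) (out : List String) : Decidable (Spec_get_most_probable_disease disease_count_list out) := by unfold Spec_get_most_probable_disease; infer_instance

-- ===== CLAIM (what is proved, stated in full; the proofs are below) =====
def Claim_equal_get_most_probable_disease : Prop := ∀ (disease_count_list : List (String × Int)), Dom_get_most_probable_disease disease_count_list → Spec_get_most_probable_disease disease_count_list (get_most_probable_disease disease_count_list)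

-- ===== LEMMAS AND PROOFS =====
lemma pv_loop_eq (l : List (String × Int)) (acc : List String) (m : Int) :
    (l.foldl
      (fun (st : List String × Int) dc =>
        if dc.2 ≥ st.2 then (st.1 ++ [dc.1], dc.2) else st)
      (acc, m)).1
    = acc ++ ((l.zip (pvThresholds l m)).filter (fun p => p.1.2 ≥ p.2)).map (fun p => p.1.1) := by
  induction l generalizing acc m with
  | nil => simp
  | cons hd tl ih =>
    obtain ⟨d, c⟩ := hd
    by_cases h : c ≥ m
    · simp [pvThresholds, List.foldl_cons, h, ih]
    · simp [pvThresholds, List.foldl_cons, h, max_eq_left (by omega : c ≤ m), ih]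

-- ===== VERDICT (by name: the statement is the Claim_ definition above) =====
theorem get_most_probable_disease_spec : Claim_equal_get_most_probable_disease := by
  intro l _
  show get_most_probable_disease l = get_most_probable_disease_alt l
  simpa [get_most_probable_disease_alt] using pv_loop_eq l [] 0
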